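-- pv_equiv track=rewrite | github.com/bentdixon/nda-release-4-pipeline | features/grammar.py | extract_feature
-- ===== SOURCE A (Python) =====
-- from typing import Optional
--
-- def extract_feature(featstr: Optional[str], feat_type: str) -> str:
--     """Extract specific morphological feature from Stanza output."""
--     feature = ''
--     if featstr is not None:
--         feature_list = featstr.split('|')
--         for f in feature_list:
--             if feat_type in f:
--                 if feat_type != 'Mood':
--                     feature = f[len(feat_type) + 1:]
--                 else:
--                     feature = f[len(feat_type) + 1:] + '_mood'
--     return feature
-- ===== SOURCE B (Python) =====
-- def extract_feature(featstr, feat_type):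
--     """Extract specific morphological feature from Stanza output."""
--     if featstr is None:
--         return ''
--     buf = []  # characters of the current field, collected right-to-left
--     # One right-to-left CHARACTER pass (no split): each '|' is the left
--     # boundary of the field collected in `buf`, so assemble and test the field
--     # there and stop on a match -- the first match found this way is the last
--     # matching field in forward order.
--     for c in reversed(featstr):
--         if c == '|':
--             tok = ''.join(reversed(buf))
--             if feat_type in tok:
--                 return _emit(tok, feat_type)
--             buf = []
--         else:
--             buf.append(c)
--     tok = ''.join(reversed(buf))
--     return _emit(tok, feat_type) if feat_type in tok else ''
--
--
-- def _emit(tok, feat_type):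
--     value = tok[len(feat_type) + 1:]
--     return value + '_mood' if feat_type == 'Mood' else value
-- ===== Notes on version B (the rewrite author's own statement) =====
-- stated objective: alternative
-- what changed: B never calls split: a single right-to-left character pass builds each field in an accumulator and tests it at its '|' boundary, returning at the first match found (= the last matching field in forward order), so tokenisation is fused with the search and no token list is materialised.
import Mathlib
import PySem

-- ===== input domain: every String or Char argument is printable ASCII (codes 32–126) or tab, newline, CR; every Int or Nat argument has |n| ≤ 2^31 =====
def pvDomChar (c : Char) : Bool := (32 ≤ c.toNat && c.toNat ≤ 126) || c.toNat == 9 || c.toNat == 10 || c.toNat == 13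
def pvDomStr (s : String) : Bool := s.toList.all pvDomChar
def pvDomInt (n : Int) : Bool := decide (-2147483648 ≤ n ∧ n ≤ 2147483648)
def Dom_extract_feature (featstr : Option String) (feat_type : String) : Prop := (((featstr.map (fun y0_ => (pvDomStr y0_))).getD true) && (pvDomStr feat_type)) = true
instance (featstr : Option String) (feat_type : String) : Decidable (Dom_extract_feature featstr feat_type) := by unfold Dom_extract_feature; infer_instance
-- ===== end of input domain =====

-- B fuses tokenisation with the search: one right-to-left character pass with a field
-- accumulator and early exit, no split and no token list; equal return values, no speed claim.

-- ===== PORT A =====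
-- split on '|', then a forward fold that overwrites `feature` on every matching token
def extract_feature (featstr : Option String) (feat_type : String) : String :=
  match featstr with
  | none => ""
  | some s =>
    String.ofList
      (((PySem.Chars.split? s.toList "|".toList).getD []).foldl
        (fun feature f =>
          if PySem.Chars.isIn feat_type.toList f = true then
            if feat_type ≠ "Mood" then
              PySem.Chars.slice f (some (PySem.Chars.len feat_type.toList + 1)) none
            else
              PySem.Chars.join [] [PySem.Chars.slice f (some (PySem.Chars.len feat_type.toList + 1)) none, "_mood".toList]
          else feature) [])

-- ===== PORT B =====
-- _emit(tok, feat_type): the value spliced out of a matching field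
def pvEmit (feat_type : String) (tok : List Char) : List Char :=
  let value := PySem.Chars.slice tok (some (PySem.Chars.len feat_type.toList + 1)) none
  if feat_type == "Mood" then PySem.Chars.join [] [value, "_mood".toList] else value

-- the `for c in reversed(featstr)` loop: chars already reversed, `buf` is the field's
-- characters collected right-to-left; `''.join(reversed(buf))` on a char buffer is
-- exactly list reversal
def pvScan (feat_type : String) : List Char → List Char → List Char
  | [], buf =>
    let tok := buf.reverse
    if PySem.Chars.isIn feat_type.toList tok = true then pvEmit feat_type tok else []
  | c :: rest, buf =>
    if c = '|' then
      let tok := buf.reverse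
      if PySem.Chars.isIn feat_type.toList tok = true then pvEmit feat_type tok
      else pvScan feat_type rest []
    else pvScan feat_type rest (buf ++ [c])

def extract_feature_alt (featstr : Option String) (feat_type : String) : String :=
  match featstr with
  | none => ""
  | some s => String.ofList (pvScan feat_type s.toList.reverse [])

-- ===== PRECONDITION & SPEC =====
def Spec_extract_feature (featstr : Option String) (feat_type : String) (out : String) : Prop := out = extract_feature_alt featstr feat_type
instance (featstr : Option String) (feat_type : String) (out : String) : Decidable (Spec_extract_feature featstr feat_type out) := by unfold Spec_extract_feature; infer_instance

-- ===== CLAIM (what is proved, stated in full; the proofs are below) =====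
def Claim_equal_extract_feature : Prop := ∀ (featstr : Option String) (feat_type : String), Dom_extract_feature featstr feat_type → Spec_extract_feature featstr feat_type (extract_feature featstr feat_type)

-- ===== LEMMAS AND PROOFS =====

-- proof-side single-char tokenizer: what splitOn on "|" computes
def pvSplit : List Char → List (List Char)
  | [] => [[]]
  | c :: r =>
    match pvSplit r with
    | t :: ts => if c = '|' then [] :: t :: ts else (c :: t) :: ts
    | [] => []

-- proof-side "last matching token" semantics, scanning the REVERSED token list
def pvLast (feat_type : String) : List (List Char) → List Char
  | [] => []
  | t :: ts => if PySem.Chars.isIn feat_type.toList t = true then pvEmit feat_type t else pvLast feat_type ts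

theorem pvSplit_ne_nil (l : List Char) : pvSplit l ≠ [] := by
  cases l with
  | nil => simp [pvSplit]
  | cons c r =>
    simp only [pvSplit]
    rcases h : pvSplit r with _ | ⟨t, ts⟩
    · exact absurd h (pvSplit_ne_nil r)
    · split_ifs <;> simp

def pvPrep (p : List Char) : List (List Char) → List (List Char)
  | [] => [p]
  | t :: ts => (p ++ t) :: ts

theorem pvGoSpec (fuel : Nat) (l cur : List Char) (acc : List (List Char)) (h : l.length < fuel) :
    PySem.Chars.splitOn.go "|".toList fuel l cur acc = acc.reverse ++ pvPrep cur.reverse (pvSplit l) := by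
  induction fuel generalizing l cur acc with
  | zero => omega
  | succ fuel ih =>
    cases l with
    | nil => simp [PySem.Chars.splitOn.go, pvSplit, pvPrep]
    | cons c rest =>
      rw [PySem.Chars.splitOn.go]
      by_cases hc : c = '|'
      · subst hc
        rw [if_pos (by simp [List.isPrefixOf])]
        rw [show List.drop "|".toList.length ('|' :: rest) = rest from rfl]
        rw [ih rest [] (cur.reverse :: acc) (by simp at h; omega)]
        rcases hs : pvSplit rest with _ | ⟨t, ts⟩
        · exact absurd hs (pvSplit_ne_nil rest)
        · simp [pvSplit, hs, pvPrep]
      · rw [if_neg (by simp [List.isPrefixOf]; intro hh; exact hc hh.symm)]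
        rw [ih rest (c :: cur) acc (by simp at h; omega)]
        rcases hs : pvSplit rest with _ | ⟨t, ts⟩
        · exact absurd hs (pvSplit_ne_nil rest)
        · simp [pvSplit, hs, pvPrep, hc]

theorem pvSplitOn_eq (l : List Char) : PySem.Chars.splitOn l "|".toList = pvSplit l := by
  rw [PySem.Chars.splitOn, pvGoSpec (l.length + 1) l [] [] (Nat.lt_succ_self _)]
  rcases hs : pvSplit l with _ | ⟨t, ts⟩
  · exact absurd hs (pvSplit_ne_nil l)
  · simp [pvPrep]

theorem pvSplit_no_sep (l : List Char) (h : '|' ∉ l) : pvSplit l = [l] := by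
  induction l with
  | nil => rfl
  | cons c r ih =>
    simp only [List.mem_cons, not_or] at h
    have hc : ¬ c = '|' := fun hh => h.1 hh.symm
    simp [pvSplit, ih h.2, hc]

theorem pvSplit_append_sep (a b : List Char) : pvSplit (a ++ '|' :: b) = pvSplit a ++ pvSplit b := by
  induction a with
  | nil =>
    rcases hs : pvSplit b with _ | ⟨t, ts⟩
    · exact absurd hs (pvSplit_ne_nil b)
    · simp [pvSplit, hs]
  | cons c r ih =>
    rcases hs : pvSplit (r ++ '|' :: b) with _ | ⟨t, ts⟩
    · exact absurd hs (pvSplit_ne_nil (r ++ '|' :: b))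
    · rcases hr : pvSplit r with _ | ⟨u, us⟩
      · exact absurd hr (pvSplit_ne_nil r)
      · rw [ih, hr] at hs
        by_cases hc : c = '|' <;>
          cases hs <;> simp [pvSplit, hr, ih, hc]

-- A's forward overwriting fold computes the last-match semantics
theorem pvFold_eq_last (feat_type : String) (L : List (List Char)) :
    L.foldl
      (fun feature f =>
        if PySem.Chars.isIn feat_type.toList f = true then
          if feat_type ≠ "Mood" then
            PySem.Chars.slice f (some (PySem.Chars.len feat_type.toList + 1)) none
          else
            PySem.Chars.join [] [PySem.Chars.slice f (some (PySem.Chars.len feat_type.toList + 1)) none, "_mood".toList]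
        else feature) []
    = pvLast feat_type L.reverse := by
  induction L using List.reverseRecOn with
  | nil => rfl
  | append_singleton l x ih =>
    rw [List.foldl_append, List.reverse_append]
    simp only [List.foldl_cons, List.foldl_nil, List.reverse_singleton, List.singleton_append,
      pvLast, ih]
    by_cases h : PySem.Chars.isIn feat_type.toList x = true
    · simp only [h, if_pos]
      by_cases hm : feat_type = "Mood" <;> simp [hm, pvEmit]
    · simp [h]

-- B's reverse character scan computes the same last-match semantics
theorem pvScan_eq_last (feat_type : String) (r buf : List Char) (hbuf : '|' ∉ buf) :
    pvScan feat_type r buf = pvLast feat_type (pvSplit (r.reverse ++ buf.reverse)).reverse := by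
  induction r generalizing buf with
  | nil => simp [pvScan, pvSplit_no_sep buf.reverse (by simpa using hbuf), pvLast]
  | cons c r' ih =>
    by_cases hc : c = '|'
    · subst hc
      simp only [pvScan, List.reverse_cons, List.append_assoc, List.singleton_append]
      rw [pvSplit_append_sep, pvSplit_no_sep buf.reverse (by simpa using hbuf), List.reverse_append]
      simp only [List.reverse_singleton, List.singleton_append, pvLast]
      by_cases h : PySem.Chars.isIn feat_type.toList buf.reverse = true
      · simp [h]
      · simp only [h, Bool.false_eq_true, if_false]
        simpa using ih [] (by simp)
    · have harr : r'.reverse ++ (buf ++ [c]).reverse = (c :: r').reverse ++ buf.reverse := by simp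
      rw [pvScan, if_neg hc,
        ih (buf ++ [c]) (by simp only [List.mem_append, List.mem_singleton, not_or]; exact ⟨hbuf, fun hh => hc hh.symm⟩), harr]

-- ===== VERDICT (by name: the statement is the Claim_ definition above) =====
theorem extract_feature_spec : Claim_equal_extract_feature := by
  intro featstr feat_type _
  unfold Spec_extract_feature extract_feature extract_feature_alt
  cases featstr with
  | none => rfl
  | some s =>
    have hsplit : (PySem.Chars.split? s.toList "|".toList).getD [] = pvSplit s.toList := by
      rw [PySem.Chars.split?, if_neg (by simp), Option.getD_some, pvSplitOn_eq]
    simp only [hsplit, pvFold_eq_last, pvScan_eq_last feat_type s.toList.reverse [] (by simp)]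
    simp
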